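-- pv_equiv track=rewrite | github.com/leandl/sistemas-para-internet | ESTRUTURA_DE_DADOS/DLC/binary_search_tree/show_tree.py | __left_align
-- ===== SOURCE A (Python) =====
-- def __left_align(matrix, compact=False):
--     # Find the index of the first non-empty column
--     empty_columns = []
--     for col_idx in range(len(matrix[0])):
--         for row_idx in range(len(matrix)):
--             symbol = matrix[row_idx][col_idx]
--             if symbol == ' ' or (symbol == '─' if compact else False):
--                 continue
--             else:
--                 break
--         else:
--             empty_columns.append(col_idx)
--
--     # Replace space characters with empty strings in empty columns
--     for row_idx in range(len(matrix)):
--         for col_idx in empty_columns: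
--             matrix[row_idx][col_idx] = ''
--
--     return matrix
-- ===== SOURCE B (Python) =====
-- def __left_align(matrix, compact=False):
--     allowed = (' ', '\u2500') if compact else (' ',)
--     # boolean mask over the first row's columns, AND-reduced row by row
--     blank = [True] * len(matrix[0])
--     for row in matrix:
--         blank = [b and row[c] in allowed for c, b in enumerate(blank)]
--     # rewrite each row through the mask (zip truncates at the mask length)
--     for row in matrix:
--         row[:len(blank)] = ['' if b else s for b, s in zip(blank, row)]
--     return matrix
-- ===== Notes on version B (the rewrite author's own statement) =====
-- stated objective: alternative
-- what changed: Replaces A's column-major break/for-else scan and empty-column index list by an elementwise AND-reduction of a boolean column mask over the rows, followed by a per-row zip rewrite through the mask (no column-index bookkeeping, no nested index loops).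
import Mathlib
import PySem

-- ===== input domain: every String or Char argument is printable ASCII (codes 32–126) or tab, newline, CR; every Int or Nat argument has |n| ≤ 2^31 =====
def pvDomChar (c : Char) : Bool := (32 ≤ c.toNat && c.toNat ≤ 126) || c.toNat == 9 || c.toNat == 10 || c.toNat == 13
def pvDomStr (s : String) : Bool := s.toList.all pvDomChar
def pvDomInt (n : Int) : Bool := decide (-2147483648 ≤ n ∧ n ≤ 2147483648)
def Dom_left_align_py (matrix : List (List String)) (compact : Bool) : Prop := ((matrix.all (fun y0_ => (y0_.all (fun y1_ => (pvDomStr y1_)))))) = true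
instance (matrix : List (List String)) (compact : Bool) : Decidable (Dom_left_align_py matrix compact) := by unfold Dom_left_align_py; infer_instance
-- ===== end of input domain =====

-- B replaces A's column-major break/for-else scan and empty-column list by an AND-reduced
-- boolean column mask folded over the rows, then a zip rewrite of each row through the mask
-- (alternative decomposition, same cost). Equivalence is about the RETURN value; both
-- Pythons also mutate `matrix` in place, producing the same final list.


-- ===== PORT A =====
-- A-side helpers: the test in A's inner `if`, the inner for-else-with-break over rows as a
-- short-circuiting `all`, and the empty_columns-building loop
def pvA_test (compact : Bool) (symbol : String) : Bool :=
  symbol == " " || (if compact then symbol == "─" else false)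

def pvA_colBlank (matrix : List (List String)) (compact : Bool) (col_idx : Int) : Bool :=
  (PySem.List.pyRange 0 (matrix.length : Int) 1).all (fun row_idx =>
    pvA_test compact (PySem.List.pyGetD (PySem.List.pyGetD matrix row_idx []) col_idx ""))

def pvA_emptyColumns (matrix : List (List String)) (compact : Bool) : List Int :=
  (PySem.List.pyRange 0 (((PySem.List.pyGet? matrix 0).getD []).length : Int) 1).foldl
    (fun acc col_idx => if pvA_colBlank matrix compact col_idx then acc ++ [col_idx] else acc) []

def left_align_py (matrix : List (List String)) (compact : Bool) : List (List String) :=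
  -- for row_idx in range(len(matrix)): for col_idx in empty_columns: matrix[row_idx][col_idx] = ''
  (PySem.List.pyRange 0 (matrix.length : Int) 1).foldl
    (fun m row_idx =>
      (pvA_emptyColumns matrix compact).foldl
        (fun m col_idx =>
          PySem.List.pySetD m row_idx
            (PySem.List.pySetD (PySem.List.pyGetD m row_idx []) col_idx "")) m)
    matrix

-- ===== PORT B =====
-- B-side helpers: allowed = (' ','─') if compact else (' ',); one mask update
-- blank = [b and row[c] in allowed for c, b in enumerate(blank)] (short-circuiting `and`)
def pvB_allowed (compact : Bool) : List String :=
  if compact then [" ", "─"] else [" "]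

def pvB_step (compact : Bool) (blank : List Bool) (row : List String) : List Bool :=
  (PySem.List.enumerate blank 0).map (fun p =>
    if p.2 then (pvB_allowed compact).contains (PySem.List.pyGetD row p.1 "") else false)

def pvB_blank (matrix : List (List String)) (compact : Bool) : List Bool :=
  matrix.foldl (pvB_step compact)
    (List.replicate ((PySem.List.pyGet? matrix 0).getD []).length true)

def left_align_py_alt (matrix : List (List String)) (compact : Bool) : List (List String) :=
  -- for row in matrix: row[:len(blank)] = ['' if b else s for b, s in zip(blank, row)]
  matrix.map (fun row =>
    ((pvB_blank matrix compact).zip row).map (fun p => if p.1 then "" else p.2)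
      ++ row.drop (pvB_blank matrix compact).length)

-- ===== PRECONDITION & SPEC =====
-- the allowed-symbol test, restated independently for the precondition
def pvPreTest (compact : Bool) (s : String) : Bool := s == " " || (compact && s == "─")

-- Pre_ excludes exactly the inputs on which the Python A raises IndexError: the empty matrix,
-- and ragged matrices where some column scan, with every cell above still allowed, reaches a
-- row too short to index at that column (B raises IndexError on exactly the same inputs).
def Pre_left_align_py (matrix : List (List String)) (compact : Bool) : Prop :=
  matrix ≠ [] ∧
  ∀ c < (matrix.headD []).length, ∀ i < matrix.length,
    (matrix.getD i []).length ≤ c →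
      ∃ j < i, c < (matrix.getD j []).length ∧
        pvPreTest compact ((matrix.getD j []).getD c "") = false
instance (matrix : List (List String)) (compact : Bool) : Decidable (Pre_left_align_py matrix compact) := by unfold Pre_left_align_py; infer_instance

def pvWitness_left_align_py : List (List String) × Bool := ([[" ", "a", " "], [" ", "b", " "]], false)

def Spec_left_align_py (matrix : List (List String)) (compact : Bool) (out : List (List String)) : Prop := out = left_align_py_alt matrix compact
instance (matrix : List (List String)) (compact : Bool) (out : List (List String)) : Decidable (Spec_left_align_py matrix compact out) := by unfold Spec_left_align_py; infer_instance

-- ===== CLAIM (what is proved, stated in full; the proofs are below) =====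
def Claim_equal_left_align_py : Prop := ∀ (matrix : List (List String)) (compact : Bool), Dom_left_align_py matrix compact → Pre_left_align_py matrix compact → Spec_left_align_py matrix compact (left_align_py matrix compact)

-- ===== LEMMAS AND PROOFS =====

-- collapse A's inner mutation loop at a fixed row index into one row update
theorem pv_inner_mut (cs : List Int) (m : List (List String)) (i : Int)
    (h0 : 0 ≤ i) (hi : i.toNat < m.length) :
    cs.foldl (fun m c => PySem.List.pySetD m i (PySem.List.pySetD (PySem.List.pyGetD m i []) c "")) m
    = PySem.List.pySetD m i (cs.foldl (fun r c => PySem.List.pySetD r c "") (PySem.List.pyGetD m i [])) := by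
  induction cs generalizing m with
  | nil =>
    simp only [List.foldl_nil]
    rw [PySem.List.pySetD_of_nonneg _ _ h0, PySem.List.pyGetD_eq_getElem _ _ h0 (by omega),
      List.set_getElem_self hi]
  | cons c cs ih =>
    simp only [List.foldl_cons]
    rw [ih _ (by rw [PySem.List.length_pySetD]; exact hi)]
    have hgs : PySem.List.pyGetD
        (PySem.List.pySetD m i (PySem.List.pySetD (PySem.List.pyGetD m i []) c "")) i []
        = PySem.List.pySetD (PySem.List.pyGetD m i []) c "" := by
      rw [PySem.List.pySetD_of_nonneg _ _ h0,
        PySem.List.pyGetD_eq_getElem _ _ h0 (by rw [List.length_set]; omega)]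
      exact List.getElem_set_self (by simpa using hi)
    rw [hgs, PySem.List.pySetD_of_nonneg _ _ h0, PySem.List.pySetD_of_nonneg _ _ h0,
      List.set_set, PySem.List.pySetD_of_nonneg _ _ h0]

-- the whole mutation phase: first n rows rewritten
theorem pv_foldl_mut_aux (xs : List (List String)) (cs : List Int) (n : Nat) (hn : n ≤ xs.length) :
    (PySem.List.pyRange 0 (n : Int) 1).foldl
      (fun m i => cs.foldl
        (fun m c => PySem.List.pySetD m i (PySem.List.pySetD (PySem.List.pyGetD m i []) c "")) m) xs
    = (xs.take n).map (fun r => cs.foldl (fun r c => PySem.List.pySetD r c "") r) ++ xs.drop n := by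
  set g : List String → List String := fun r => cs.foldl (fun r c => PySem.List.pySetD r c "") r with hg
  induction n with
  | zero => simp [PySem.List.pyRange_one_eq_nil]
  | succ n ih =>
    have hn' : n ≤ xs.length := Nat.le_of_succ_le hn
    have hlt : n < xs.length := hn
    have hcast : ((n + 1 : Nat) : Int) = (n : Int) + 1 := by push_cast; ring
    rw [hcast, PySem.List.pyRange_one_succ_right (by positivity), List.foldl_append, ih hn']
    have hlen : ((xs.take n).map g).length = n := by
      simp [Nat.min_eq_left hn']
    have hXlen : ((xs.take n).map g ++ xs.drop n).length = xs.length := by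
      simp [Nat.min_eq_left hn']; omega
    have hget : PySem.List.pyGetD ((xs.take n).map g ++ xs.drop n) (n : Int) [] = xs[n] := by
      rw [PySem.List.pyGetD_eq_getElem _ _ (by positivity) (by simp; omega)]
      simp only [Int.toNat_natCast]
      rw [List.getElem_append_right (by omega)]
      simp [Nat.min_eq_left hn']
    simp only [List.foldl_cons, List.foldl_nil]
    rw [pv_inner_mut cs _ (n : Int) (by positivity) (by rw [Int.toNat_natCast, hXlen]; exact hlt)]
    simp only [hget, PySem.List.pySetD_natCast]
    rw [List.set_append_right _ _ (by rw [hlen])]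
    have h0 : n - ((xs.take n).map g).length = 0 := by rw [hlen]; omega
    rw [h0, List.drop_eq_getElem_cons hlt, List.set_cons_zero]
    have htake : xs.take (n + 1) = xs.take n ++ [xs[n]] := by
      rw [List.take_add_one, List.getElem?_eq_getElem hlt]; rfl
    rw [htake, List.map_append]
    simp [hg]

theorem pv_foldl_mut (xs : List (List String)) (cs : List Int) :
    (PySem.List.pyRange 0 (xs.length : Int) 1).foldl
      (fun m i => cs.foldl
        (fun m c => PySem.List.pySetD m i (PySem.List.pySetD (PySem.List.pyGetD m i []) c "")) m) xs
    = xs.map (fun r => cs.foldl (fun r c => PySem.List.pySetD r c "") r) := by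
  simpa using pv_foldl_mut_aux xs cs xs.length le_rfl

-- one mask update preserves the length and acts elementwise
theorem pv_step_length (compact : Bool) (blank : List Bool) (row : List String) :
    (pvB_step compact blank row).length = blank.length := by
  simp [pvB_step, PySem.List.length_enumerate]

theorem pv_step_q (compact : Bool) (blank : List Bool) (row : List String)
    (k : Nat) (hk : k < blank.length) :
    (pvB_step compact blank row)[k]?
      = some (blank[k] && (pvB_allowed compact).contains (PySem.List.pyGetD row (k : Int) "")) := by
  simp only [pvB_step, List.getElem?_map, PySem.List.getElem?_enumerate,
    List.getElem?_eq_getElem hk, Option.map_some, zero_add]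
  cases blank[k] <;> simp

-- the mask fold: length preserved, element k is the AND over all rows
theorem pv_blankfold_length (compact : Bool) (rows : List (List String)) (b0 : List Bool) :
    (rows.foldl (pvB_step compact) b0).length = b0.length := by
  induction rows generalizing b0 with
  | nil => rfl
  | cons r rs ih => rw [List.foldl_cons, ih, pv_step_length]

theorem pv_blankfold_q (compact : Bool) (rows : List (List String)) (b0 : List Bool)
    (k : Nat) (hk : k < b0.length) :
    (rows.foldl (pvB_step compact) b0)[k]?
      = some (b0[k] && rows.all (fun row =>
          (pvB_allowed compact).contains (PySem.List.pyGetD row (k : Int) ""))) := by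
  induction rows generalizing b0 with
  | nil => simp only [List.foldl_nil, List.all_nil, Bool.and_true, List.getElem?_eq_getElem hk]
  | cons r rs ih =>
    have h1 : k < (pvB_step compact b0 r).length := by rw [pv_step_length]; exact hk
    have h3 : (pvB_step compact b0 r)[k]'h1
        = (b0[k] && (pvB_allowed compact).contains (PySem.List.pyGetD r (k : Int) "")) := by
      have h4 := pv_step_q compact b0 r k hk
      rw [List.getElem?_eq_getElem h1] at h4
      exact Option.some.inj h4
    rw [List.foldl_cons, ih (pvB_step compact b0 r) h1, h3, List.all_cons, Bool.and_assoc]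

-- B's mask bit k is the AND of the allowed test down column k
theorem pv_blank_q (matrix : List (List String)) (compact : Bool) (k : Nat)
    (hk : k < ((PySem.List.pyGet? matrix 0).getD []).length) :
    (pvB_blank matrix compact)[k]?
      = some (matrix.all (fun row =>
          (pvB_allowed compact).contains (PySem.List.pyGetD row (k : Int) ""))) := by
  unfold pvB_blank
  rw [pv_blankfold_q compact matrix _ k (by rw [List.length_replicate]; exact hk)]
  simp

theorem pv_blank_length (matrix : List (List String)) (compact : Bool) :
    (pvB_blank matrix compact).length = ((PySem.List.pyGet? matrix 0).getD []).length := by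
  unfold pvB_blank
  rw [pv_blankfold_length, List.length_replicate]

-- A's inner test is B's tuple membership
theorem pv_test_eq (compact : Bool) (s : String) :
    pvA_test compact s = (pvB_allowed compact).contains s := by
  cases compact <;> simp [pvA_test, pvB_allowed, List.contains_eq_mem, beq_eq_decide]

-- A's column-blank flag is the same AND down the column
theorem pv_colBlank_all (matrix : List (List String)) (compact : Bool) (c : Int) :
    pvA_colBlank matrix compact c
      = matrix.all (fun row => (pvB_allowed compact).contains (PySem.List.pyGetD row c "")) := by
  have hall : pvA_colBlank matrix compact c
      = matrix.all (fun row => pvA_test compact (PySem.List.pyGetD row c "")) := by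
    unfold pvA_colBlank
    conv_rhs => rw [← PySem.List.map_pyGetD_pyRange_zero' matrix []]
    rw [List.all_map]
    rfl
  rw [hall]
  exact List.all_congr rfl (fun row => pv_test_eq compact _)

-- folding `pySetD · c ""` over nonnegative column indices acts elementwise
theorem pv_setfold_length (cs : List Int) (r : List String) :
    (cs.foldl (fun r c => PySem.List.pySetD r c "") r).length = r.length := by
  induction cs generalizing r with
  | nil => rfl
  | cons c cs ih => rw [List.foldl_cons, ih, PySem.List.length_pySetD]

theorem pv_setfold_q (cs : List Int) (r : List String) (k : Nat) (hk : k < r.length)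
    (hcs : ∀ c ∈ cs, 0 ≤ c) :
    (cs.foldl (fun r c => PySem.List.pySetD r c "") r)[k]?
      = some (if (k : Int) ∈ cs then "" else r[k]) := by
  induction cs generalizing r with
  | nil => simp [List.getElem?_eq_getElem hk]
  | cons c cs ih =>
    rw [List.foldl_cons, PySem.List.pySetD_of_nonneg _ _ (hcs c List.mem_cons_self),
      ih (r.set c.toNat "") (by rw [List.length_set]; exact hk)
        (fun c hc => hcs c (List.mem_cons_of_mem _ hc))]
    by_cases hmem : (k : Int) ∈ cs
    · simp [hmem]
    · have hcofe : c.toNat = k ↔ (k : Int) = c := by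
        have := hcs c List.mem_cons_self
        omega
      by_cases hck : (k : Int) = c
      · simp [hck, hcofe.mpr hck]
      · have hne : ¬ c.toNat = k := fun h => hck (hcofe.mp h)
        simp [hmem, hck, hne]

-- empty_columns is the filter of the column range by the blank test
theorem pv_emptyColumns_eq (matrix : List (List String)) (compact : Bool) :
    pvA_emptyColumns matrix compact
      = (PySem.List.pyRange 0 (((PySem.List.pyGet? matrix 0).getD []).length : Int) 1).filter
          (pvA_colBlank matrix compact) := by
  unfold pvA_emptyColumns
  rw [PySem.List.foldl_append_if_eq_filter, List.nil_append]

-- the ports agree on EVERY input (both index through total pyGetD/pySetD)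
theorem pv_ports_eq (matrix : List (List String)) (compact : Bool) :
    left_align_py matrix compact = left_align_py_alt matrix compact := by
  unfold left_align_py left_align_py_alt
  rw [pv_foldl_mut]
  apply List.map_congr_left
  intro row hrow
  have hblen := pv_blank_length matrix compact
  set cols := ((PySem.List.pyGet? matrix 0).getD []).length with hcols
  have hnn : ∀ c ∈ pvA_emptyColumns matrix compact, 0 ≤ c := by
    intro c hc
    rw [pv_emptyColumns_eq, List.mem_filter, PySem.List.mem_pyRange_one] at hc
    exact hc.1.1
  have hmem : ∀ k : Nat, ((k : Int) ∈ pvA_emptyColumns matrix compact ↔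
      k < cols ∧ matrix.all (fun row =>
        (pvB_allowed compact).contains (PySem.List.pyGetD row (k : Int) "")) = true) := by
    intro k
    rw [pv_emptyColumns_eq, List.mem_filter, PySem.List.mem_pyRange_one, pv_colBlank_all]
    constructor
    · rintro ⟨⟨-, hlt⟩, hb⟩
      exact ⟨by exact_mod_cast hlt, hb⟩
    · rintro ⟨hk, hb⟩
      exact ⟨⟨by positivity, by exact_mod_cast hk⟩, hb⟩
  have hrhslen : (((pvB_blank matrix compact).zip row).map (fun p => if p.1 then "" else p.2)
      ++ row.drop (pvB_blank matrix compact).length).length = row.length := by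
    rw [List.length_append, List.length_map, List.length_zip, List.length_drop, hblen]
    omega
  apply List.ext_getElem?
  intro k
  by_cases hk : k < row.length
  · rw [pv_setfold_q _ _ _ hk hnn, List.getElem?_eq_getElem (by rw [hrhslen]; exact hk)]
    congr 1
    by_cases hkc : k < cols
    · have hkzip : k < ((pvB_blank matrix compact).zip row).length := by
        rw [List.length_zip, hblen]; omega
      rw [List.getElem_append_left (by rw [List.length_map]; exact hkzip)]
      simp only [List.getElem_map, List.getElem_zip]
      have hbk : (pvB_blank matrix compact)[k]'(by rw [hblen]; exact hkc)
          = matrix.all (fun row =>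
              (pvB_allowed compact).contains (PySem.List.pyGetD row (k : Int) "")) := by
        have h := pv_blank_q matrix compact k hkc
        rw [List.getElem?_eq_getElem (by rw [hblen]; exact hkc)] at h
        exact Option.some.inj h
      rw [hbk]
      by_cases hb : matrix.all (fun row =>
          (pvB_allowed compact).contains (PySem.List.pyGetD row (k : Int) "")) = true
      · rw [if_pos ((hmem k).mpr ⟨hkc, hb⟩), if_pos hb]
      · rw [if_neg (fun h => hb ((hmem k).mp h).2), if_neg (by simpa using hb)]
    · rw [if_neg (fun h => hkc ((hmem k).mp h).1),
        List.getElem_append_right (by rw [List.length_map, List.length_zip, hblen]; omega)]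
      simp only [List.length_map, List.length_zip, hblen, List.getElem_drop]
      congr 1
      omega
  · rw [List.getElem?_eq_none (by rw [pv_setfold_length]; omega),
      List.getElem?_eq_none (by rw [hrhslen]; omega)]

-- ===== VERDICT (by name: the statement is the Claim_ definition above) =====
theorem left_align_py_spec : Claim_equal_left_align_py := by
  intro matrix compact _ _
  unfold Spec_left_align_py
  exact pv_ports_eq matrix compact
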